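-- pv_equiv track=rewrite | github.com/ianmilligan1/Historian-WARC-1 | warc.py | nGramsToKWICDict
-- ===== SOURCE A (Python) =====
-- def nGramsToKWICDict(ngrams):
--     keyindex = len(ngrams[0]) // 2
--
--     kwicdict = {}
--
--     for k in ngrams:
--       if k[keyindex] not in kwicdict:
--         kwicdict[k[keyindex]] = [k]
--       else:
--         kwicdict[k[keyindex]].append(k)
--     return kwicdict
-- ===== SOURCE B (Python) =====
-- def nGramsToKWICDict(ngrams):
--     keyindex = len(ngrams[0]) // 2
--     mids = [k[keyindex] for k in ngrams]
--     return {key: [k for k, m in zip(ngrams, mids) if m == key]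
--             for key in dict.fromkeys(mids)}
-- ===== Notes on version B (the rewrite author's own statement) =====
-- stated objective: alternative
-- what changed: Instead of growing a dict incrementally with a membership test per n-gram, B precomputes the middle elements, takes their first-occurrence-ordered distinct keys via dict.fromkeys, and builds each group in one filtering comprehension per key.
import Mathlib
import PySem

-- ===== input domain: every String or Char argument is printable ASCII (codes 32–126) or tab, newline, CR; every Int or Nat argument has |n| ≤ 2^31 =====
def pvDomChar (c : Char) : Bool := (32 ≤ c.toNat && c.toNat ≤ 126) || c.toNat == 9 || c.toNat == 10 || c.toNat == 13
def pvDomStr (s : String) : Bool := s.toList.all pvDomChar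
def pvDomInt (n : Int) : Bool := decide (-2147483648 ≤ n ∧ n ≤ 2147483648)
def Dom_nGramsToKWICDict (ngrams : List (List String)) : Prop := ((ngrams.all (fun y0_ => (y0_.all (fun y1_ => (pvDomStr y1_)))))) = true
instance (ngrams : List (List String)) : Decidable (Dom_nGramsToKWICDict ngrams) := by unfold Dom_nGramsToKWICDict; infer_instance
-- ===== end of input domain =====

-- B groups by building the ordered distinct middle keys once and filtering the list per key,
-- instead of A's incremental dict with a membership test per n-gram (objective: alternative decomposition).

-- ===== PORT A =====
def nGramsToKWICDict (ngrams : List (List String)) : List (String × List (List String)) :=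
  let keyindex : Int := PySem.Int.floordiv ((ngrams.headD []).length : Int) 2
  (ngrams.foldl (fun d k =>
      let key := PySem.List.pyGetD k keyindex ""
      if d.contains key = false then d.insert key [k]
      else d.insert key (d.getD key [] ++ [k]))
    PySem.Dict.empty).items

-- ===== PORT B =====
def nGramsToKWICDict_alt (ngrams : List (List String)) : List (String × List (List String)) :=
  let keyindex : Int := PySem.Int.floordiv ((ngrams.headD []).length : Int) 2
  let mids := ngrams.map (fun k => PySem.List.pyGetD k keyindex "")
  (PySem.List.dedup mids).map (fun key =>
    (key, ((ngrams.zip mids).filter (fun p => p.2 == key)).map (fun p => p.1)))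

-- ===== PRECONDITION & SPEC =====
-- Pre_ excludes exactly the inputs where Python A raises IndexError: the empty list
-- (ngrams[0]) and lists containing an n-gram shorter than keyindex+1.
def Pre_nGramsToKWICDict (ngrams : List (List String)) : Prop :=
  ngrams ≠ [] ∧ ∀ k ∈ ngrams, (ngrams.headD []).length / 2 < k.length
instance (ngrams : List (List String)) : Decidable (Pre_nGramsToKWICDict ngrams) := by
  unfold Pre_nGramsToKWICDict; infer_instance
def pvWitness_nGramsToKWICDict : List (List String) :=
  [["a", "b", "c"], ["x", "b", "y"], ["p", "q", "r"]]

def Spec_nGramsToKWICDict (ngrams : List (List String)) (out : List (String × List (List String))) : Prop := out = nGramsToKWICDict_alt ngrams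
instance (ngrams : List (List String)) (out : List (String × List (List String))) : Decidable (Spec_nGramsToKWICDict ngrams out) := by unfold Spec_nGramsToKWICDict; infer_instance

-- ===== CLAIM (what is proved, stated in full; the proofs are below) =====
def Claim_equal_nGramsToKWICDict : Prop := ∀ (ngrams : List (List String)), Dom_nGramsToKWICDict ngrams → Pre_nGramsToKWICDict ngrams → Spec_nGramsToKWICDict ngrams (nGramsToKWICDict ngrams)

-- ===== LEMMAS AND PROOFS =====

-- A's branch always amounts to inserting the extended group (the group is [] when the key is new).
theorem pvStepEq (f : List String → String) (d : PySem.Dict String (List (List String)))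
    (k : List String) :
    (if d.contains (f k) = false then d.insert (f k) [k]
     else d.insert (f k) (d.getD (f k) [] ++ [k]))
    = d.insert (f k) (d.getD (f k) [] ++ [k]) := by
  by_cases h : d.contains (f k) = false
  · simp [h, PySem.Dict.getD_of_not_contains d [] h]
  · simp [h]

theorem pvFoldGetD (f : List String → String) (l : List (List String))
    (d : PySem.Dict String (List (List String))) (key : String) :
    (l.foldl (fun d k => d.insert (f k) (d.getD (f k) [] ++ [k])) d).getD key []
      = d.getD key [] ++ l.filter (fun k => f k == key) := by
  induction l generalizing d with
  | nil => simp
  | cons x xs ih =>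
      simp only [List.foldl_cons, List.filter_cons, ih]
      by_cases h : f x = key
      · simp [h]
      · simp [PySem.Dict.getD_insert, h, Ne.symm h, beq_iff_eq]

theorem pvZipFilter (f : List String → String) (l : List (List String)) (key : String) :
    ((l.zip (l.map f)).filter (fun p => p.2 == key)).map (fun p => p.1)
      = l.filter (fun k => f k == key) := by
  induction l with
  | nil => rfl
  | cons x xs ih =>
      simp only [List.map_cons, List.zip_cons_cons, List.filter_cons]
      by_cases h : f x == key
      · simp [h, ih]
      · simp [h, ih]

theorem pvFoldEq (f : List String → String) (l : List (List String)) :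
    (l.foldl (fun d k =>
        if d.contains (f k) = false then d.insert (f k) [k]
        else d.insert (f k) (d.getD (f k) [] ++ [k])) PySem.Dict.empty).items
      = (PySem.Set.ofList (l.map f)).map (fun key => (key, l.filter (fun k => f k == key))) := by
  have hfun : (fun (d : PySem.Dict String (List (List String))) k =>
      if d.contains (f k) = false then d.insert (f k) [k]
      else d.insert (f k) (d.getD (f k) [] ++ [k]))
      = fun d k => d.insert (f k) (d.getD (f k) [] ++ [k]) := by
    funext d k; exact pvStepEq f d k
  rw [hfun]
  set D := l.foldl (fun d k => d.insert (f k) (d.getD (f k) [] ++ [k])) PySem.Dict.empty with hD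
  have hkeys : D.keys = PySem.Set.ofList (l.map f) := by
    rw [hD, PySem.Dict.keys_foldl_insert_key]
    simp [PySem.Set.update_nil_left]
  have hnd : D.keys.Nodup := by
    rw [hkeys]; exact PySem.Set.nodup_ofList _
  rw [PySem.Dict.items_eq_map_keys D hnd [], hkeys]
  refine List.map_congr_left (fun key hk => ?_)
  rw [hD, pvFoldGetD]
  simp

-- ===== VERDICT (by name: the statement is the Claim_ definition above) =====
theorem nGramsToKWICDict_spec : Claim_equal_nGramsToKWICDict := by
  intro ngrams _ _
  unfold Spec_nGramsToKWICDict nGramsToKWICDict nGramsToKWICDict_alt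
  rw [pvFoldEq]
  refine List.map_congr_left (fun key hk => ?_)
  rw [pvZipFilter]
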